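-- pv_equiv track=rewrite | github.com/szufix/outer-diversity | src/optimal_votes.py | integer_to_vote
-- ===== SOURCE A (Python) =====
-- def integer_to_vote(code: int, m: int) -> tuple:
--     """
--     Convert an integer back to a vote (permutation).
--
--     Args:
--         code: Integer representing the vote
--         m: Number of candidates
--
--     Returns:
--         Tuple representing the permutation
--     """
--     candidates = list(range(m))
--     result = []
--
--     for i in range(m-1, 0, -1):
--         factorial = 1
--         for j in range(1, i+1):
--             factorial *= j
--
--         pos = code // factorial
--         result.append(candidates.pop(pos))
--         code %= factorial
--
--     result.append(candidates[0])
--     return tuple(reversed(result))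
-- ===== SOURCE B (Python) =====
-- def integer_to_vote(code: int, m: int) -> tuple:
--     """
--     Convert an integer back to a vote (permutation).
--
--     Alternative implementation: the factorial-base digits are extracted
--     low-to-high by one divmod chain (no per-step factorial recomputation;
--     the final quotient is discarded, so the code is read modulo m!), and
--     the permutation is written directly into a fixed output array by
--     advancing through a used-flag array, instead of popping from a
--     shrinking list and reversing at the end.
--     """
--     # factorial digits d_1 .. d_{m-1}, low to high: d_i = (code // i!) % (i+1)
--     digits = [0] * (m - 1)
--     for r in range(2, m + 1):
--         code, digits[r - 2] = divmod(code, r)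
--     used = [False] * m
--     out = [0] * m
--     for i in range(m - 1, 0, -1):
--         k = digits[i - 1]
--         c = 0
--         while used[c]:
--             c += 1
--         while k:
--             c += 1
--             if not used[c]:
--                 k -= 1
--         used[c] = True
--         out[i] = c
--     c = 0
--     while used[c]:
--         c += 1
--     out[0] = c
--     return tuple(out)
-- ===== Notes on version B (the rewrite author's own statement) =====
-- stated objective: alternative
-- what changed: B extracts the factorial-base digits low-to-high with a single divmod chain (reading the code modulo m!) instead of recomputing i! from scratch inside every iteration, and places candidates by advancing through a used-flag array into a fixed output array instead of popping from a shrinking list and reversing the collected list.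
import Mathlib
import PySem

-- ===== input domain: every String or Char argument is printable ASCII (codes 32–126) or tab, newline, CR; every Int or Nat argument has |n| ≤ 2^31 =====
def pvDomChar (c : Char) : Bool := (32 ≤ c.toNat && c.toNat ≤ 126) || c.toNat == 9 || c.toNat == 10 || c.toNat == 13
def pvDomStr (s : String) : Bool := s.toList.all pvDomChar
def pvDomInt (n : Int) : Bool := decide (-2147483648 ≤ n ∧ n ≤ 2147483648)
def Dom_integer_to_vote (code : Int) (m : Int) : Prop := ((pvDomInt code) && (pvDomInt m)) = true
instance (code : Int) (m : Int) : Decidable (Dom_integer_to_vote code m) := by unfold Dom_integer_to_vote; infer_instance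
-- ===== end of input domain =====

-- B extracts factorial-base digits with one divmod chain (reading the code modulo m!) and fills a
-- fixed output array via a used-flag walk, instead of recomputing i! each step and popping from a
-- shrinking list; on codes in [-m!, 0) where A's negative floor-division meets Python's
-- negative-index pop, both decode code mod m!, so the equivalence covers all of [-m!, m!).


-- ===== PORT A =====
-- one iteration of A's main loop; the 'none' branch is Python's IndexError (excluded by Pre_)
def pvStepA (st : List Int × List Int × Int) (i : Int) : List Int × List Int × Int :=
  let factorial := (PySem.List.pyRange 1 (i+1) 1).foldl (fun f j => f * j) 1
  let pos := PySem.Int.floordiv st.2.2 factorial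
  match PySem.List.pop? st.1 pos with
  | some (x, rest) => (rest, st.2.1 ++ [x], PySem.Int.mod st.2.2 factorial)
  | none => (st.1, st.2.1, st.2.2)

def integer_to_vote (code : Int) (m : Int) : List Int :=
  let st := (PySem.List.pyRange (m-1) 0 (-1)).foldl pvStepA
    (PySem.List.pyRange 0 m 1, ([] : List Int), code)
  (st.2.1 ++ [PySem.List.pyGetD st.1 0 0]).reverse

-- ===== PORT B =====
-- 'while used[c]: c += 1'; falling off the end is Python's IndexError (excluded by Pre_)
def pvSkipUsed (used : List Bool) (c : Nat) : Nat :=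
  if h : c < used.length then
    if used[c] then pvSkipUsed used (c+1) else c
  else c
termination_by used.length - c

-- 'while k: c += 1; if not used[c]: k -= 1'; falling off the end is Python's IndexError
def pvAdvance (used : List Bool) (k : Int) (c : Nat) : Nat :=
  if k = 0 then c
  else if h : c + 1 < used.length then
    (if used[c+1] then pvAdvance used k (c+1) else pvAdvance used (k-1) (c+1))
  else c + 1
termination_by used.length - c

-- one step of B's divmod digit chain
def pvStepD (st : Int × List Int) (r : Int) : Int × List Int :=
  (PySem.Int.floordiv st.1 r, PySem.List.pySetD st.2 (r - 2) (PySem.Int.mod st.1 r))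

-- one iteration of B's placement loop
def pvStepB (digits : List Int) (st : List Bool × List Int) (i : Int) : List Bool × List Int :=
  let k := PySem.List.pyGetD digits (i - 1) 0
  let c := pvAdvance st.1 k (pvSkipUsed st.1 0)
  (st.1.set c true, PySem.List.pySetD st.2 i (c : Int))

def integer_to_vote_alt (code : Int) (m : Int) : List Int :=
  let st := (PySem.List.pyRange 2 (m+1) 1).foldl pvStepD
    (code, List.replicate (m - 1).toNat (0 : Int))
  let fin := (PySem.List.pyRange (m-1) 0 (-1)).foldl (pvStepB st.2)
    (List.replicate m.toNat false, List.replicate m.toNat (0 : Int))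
  PySem.List.pySetD fin.2 0 ((pvSkipUsed fin.1 0 : Nat) : Int)

-- ===== PRECONDITION & SPEC =====
-- Pre_ excludes exactly the inputs on which A raises IndexError: m ≤ 0 (empty candidate list)
-- and, for m ≥ 2, codes outside [-m!, m!) (the first pop index falls outside the list).
def Pre_integer_to_vote (code : Int) (m : Int) : Prop :=
  1 ≤ m ∧ (m = 1 ∨ (-(Nat.factorial m.toNat : Int) ≤ code ∧ code < (Nat.factorial m.toNat : Int)))
-- decides 'x < (k ! : Int)' with early exit once the running factorial exceeds x, so the
-- instance below evaluates fast even for huge m (the bound itself stays the closed form above)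
def pvLtFactAux (x acc : Int) (k : Nat) : Nat → Bool
  | 0 => decide (x < acc)
  | fuel+1 => if x < acc then true else pvLtFactAux x (acc * (k : Int)) (k+1) fuel

def pvLtFact (x : Int) (k : Nat) : Bool := pvLtFactAux x 1 1 k

instance (code : Int) (m : Int) : Decidable (Pre_integer_to_vote code m) :=
  decidable_of_iff (1 ≤ m ∧ (m = 1 ∨ (pvLtFact (-code - 1) m.toNat = true ∧ pvLtFact code m.toNat = true))) (by
    have key : ∀ (x : Int) (fuel j : Nat),
        pvLtFactAux x ((Nat.factorial j : Nat) : Int) (j+1) fuel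
          = decide (x < (Nat.factorial (j + fuel) : Int)) := by
      intro x fuel
      induction fuel with
      | zero => intro j; simp [pvLtFactAux]
      | succ fuel ih =>
          intro j
          rw [pvLtFactAux]
          by_cases h : x < ((Nat.factorial j : Nat) : Int)
          · rw [if_pos h, eq_comm]
            simp only [decide_eq_true_eq]
            exact lt_of_lt_of_le h
              (by exact_mod_cast Nat.factorial_le (by omega : j ≤ j + (fuel+1)))
          · rw [if_neg h,
              show ((Nat.factorial j : Nat) : Int) * ((j+1 : Nat) : Int)
                  = ((Nat.factorial (j+1) : Nat) : Int) by push_cast [Nat.factorial_succ]; ring,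
              ih (j+1), show j+1+fuel = j+(fuel+1) by omega]
    have hf : ∀ (x : Int), (pvLtFact x m.toNat = true) ↔ x < (Nat.factorial m.toNat : Int) := by
      intro x
      have h := key x m.toNat 0
      simp only [Nat.factorial_zero, Nat.cast_one, zero_add] at h
      rw [pvLtFact, h, decide_eq_true_eq]
    unfold Pre_integer_to_vote
    rw [hf, hf]
    constructor
    · rintro ⟨h1, h2⟩
      refine ⟨h1, ?_⟩
      rcases h2 with h | ⟨ha, hb⟩
      · exact Or.inl h
      · exact Or.inr ⟨by omega, hb⟩
    · rintro ⟨h1, h2⟩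
      refine ⟨h1, ?_⟩
      rcases h2 with h | ⟨ha, hb⟩
      · exact Or.inl h
      · exact Or.inr ⟨by omega, hb⟩)

def pvWitness_integer_to_vote : Int × Int := (3, 3)

def Spec_integer_to_vote (code : Int) (m : Int) (out : List Int) : Prop := out = integer_to_vote_alt code m
instance (code : Int) (m : Int) (out : List Int) : Decidable (Spec_integer_to_vote code m out) := by unfold Spec_integer_to_vote; infer_instance

-- ===== CLAIM (what is proved, stated in full; the proofs are below) =====
def Claim_equal_integer_to_vote : Prop := ∀ (code : Int) (m : Int), Dom_integer_to_vote code m → Pre_integer_to_vote code m → Spec_integer_to_vote code m (integer_to_vote code m)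

-- ===== LEMMAS AND PROOFS =====
theorem pv_skip_shift (ys : List Bool) (x : Bool) (c : Nat) :
    pvSkipUsed (x :: ys) (c+1) = pvSkipUsed ys c + 1 := by
  fun_induction pvSkipUsed ys c with
  | case1 c h hb ih =>
      rw [pvSkipUsed]
      rw [dif_pos (by simpa using Nat.succ_lt_succ h)]
      rw [if_pos (by simpa using hb)]
      exact ih
  | case2 c h hb =>
      rw [pvSkipUsed]
      rw [dif_pos (by simpa using Nat.succ_lt_succ h)]
      rw [if_neg (by simpa using hb)]
  | case3 c h =>
      rw [pvSkipUsed]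
      rw [dif_neg (by simp; omega)]

theorem pv_adv_shift (ys : List Bool) (x : Bool) (k : Int) (c : Nat) :
    pvAdvance (x :: ys) k (c+1) = pvAdvance ys k c + 1 := by
  fun_induction pvAdvance ys k c with
  | case1 c => rw [pvAdvance, pvAdvance]; simp
  | case2 k c hk h hb ih =>
      rw [pvAdvance]
      rw [if_neg hk, dif_pos (by simpa using Nat.succ_lt_succ h)]
      rw [if_pos (by simpa using hb)]
      exact ih
  | case3 k c hk h hb ih =>
      rw [pvAdvance]
      rw [if_neg hk, dif_pos (by simpa using Nat.succ_lt_succ h)]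
      rw [if_neg (by simpa using hb)]
      exact ih
  | case4 k c hk h =>
      rw [pvAdvance, pvAdvance]
      rw [if_neg hk, if_neg hk, dif_neg (by simp; omega)]
def pvFree : List Bool → List Nat
  | [] => []
  | b :: rest => if b then (pvFree rest).map (·+1) else 0 :: (pvFree rest).map (·+1)

theorem pv_skip_nth (used : List Bool) (h : (pvFree used) ≠ []) :
    pvSkipUsed used 0 = (pvFree used).headD 0 := by
  induction used with
  | nil => simp [pvFree] at h
  | cons b rest ih =>
      rw [pvSkipUsed]
      cases b with
      | false => simp [pvFree]
      | true =>
          simp only [pvFree, if_pos] at h ⊢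
          have hne : pvFree rest ≠ [] := by simpa using h
          have : pvSkipUsed (true :: rest) (0+1) = pvSkipUsed rest 0 + 1 := pv_skip_shift _ _ _
          simp only [List.length_cons, Nat.zero_lt_succ, dif_pos, List.getElem_cons_zero, if_true, if_true]
          rw [this, ih hne]
          cases hfr : pvFree rest with
          | nil => exact absurd hfr hne
          | cons v l => simp

theorem pv_adv_nth (used : List Bool) (k : Nat) (b : Bool)
    (hk : k < (pvFree used).length) :
    pvAdvance (b :: used) ((k : Int) + 1) 0 = (pvFree used)[k] + 1 := by
  induction used generalizing k b with
  | nil => simp [pvFree] at hk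
  | cons u rest ih =>
      rw [pvAdvance]
      rw [if_neg (by omega), dif_pos (by simp)]
      simp only [List.getElem_cons_succ, List.getElem_cons_zero]
      cases u with
      | true =>
          rw [if_pos rfl, pv_adv_shift]
          simp only [pvFree, if_true] at hk ⊢
          rw [ih k true (by simpa using hk)]
          simp [List.getElem_map]
      | false =>
          rw [if_neg (by simp)]
          simp only [pvFree, if_neg (by simp : ¬ (false = true))] at hk ⊢
          cases k with
          | zero =>
              simp only [Int.natCast_zero]
              rw [show ((0:Int) + 1 - 1) = 0 by ring, pv_adv_shift, pvAdvance]
              simp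
          | succ k' =>
              rw [show ((k'+1 : Nat) : Int) + 1 - 1 = (k' : Int) + 1 by push_cast; ring,
                pv_adv_shift, ih k' false (by simpa using hk)]
              simp [List.getElem_map]

theorem pv_sel_nth (used : List Bool) (k : Nat) (hk : k < (pvFree used).length) :
    pvAdvance used (k : Int) (pvSkipUsed used 0) = (pvFree used)[k] := by
  induction used generalizing k with
  | nil => simp [pvFree] at hk
  | cons u rest ih =>
      cases u with
      | true =>
          rw [pvSkipUsed]
          simp only [List.length_cons, Nat.zero_lt_succ, dif_pos, List.getElem_cons_zero, if_true, if_true]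
          rw [pv_skip_shift, pv_adv_shift]
          simp only [pvFree, if_true] at hk ⊢
          rw [ih k (by simpa using hk)]
          simp [List.getElem_map]
      | false =>
          rw [pvSkipUsed]
          simp only [List.length_cons, Nat.zero_lt_succ, dif_pos, List.getElem_cons_zero,
            if_neg (by simp : ¬ (false = true))]
          cases k with
          | zero => rw [pvAdvance]; simp [pvFree]
          | succ k' =>
              simp only [pvFree, if_neg (by simp : ¬ (false = true))] at hk ⊢
              rw [show ((k'+1 : Nat) : Int) = (k' : Int) + 1 by push_cast; ring]
              rw [pv_adv_nth rest k' false (by simpa using hk)]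
              simp [List.getElem_map]

theorem pv_erase_free (used : List Bool) (k : Nat) (hk : k < (pvFree used).length) :
    pvFree (used.set ((pvFree used)[k]) true) = (pvFree used).eraseIdx k := by
  induction used generalizing k with
  | nil => simp [pvFree] at hk
  | cons u rest ih =>
      cases u with
      | true =>
          simp only [pvFree, if_true] at hk ⊢
          rw [List.getElem_map, List.set_cons_succ]
          simp only [pvFree, if_true]
          rw [ih k (by simpa using hk), List.eraseIdx_map]
      | false =>
          simp only [pvFree, if_neg (by simp : ¬ (false = true))] at hk ⊢
          cases k with
          | zero => simp [pvFree]
          | succ k' =>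
              simp only [List.getElem_cons_succ, List.getElem_map, List.set_cons_succ,
                List.eraseIdx_cons_succ]
              simp only [pvFree, if_neg (by simp : ¬ (false = true))]
              rw [ih k' (by simpa using hk), List.eraseIdx_map]

theorem pv_free_replicate (n : Nat) : pvFree (List.replicate n false) = List.range n := by
  induction n with
  | zero => simp [pvFree]
  | succ n ih => rw [List.replicate_succ]; simp [pvFree, ih, List.range_succ_eq_map]
theorem pv_drop_set {α : Type} (xs : List α) (j : Nat) (v : α) (h : j < xs.length) :
    (xs.set j v).drop j = v :: xs.drop (j+1) := by
  induction xs generalizing j with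
  | nil => simp at h
  | cons a t ih =>
      cases j with
      | zero => simp
      | succ j => simpa using ih j (by simpa using h)

theorem pv_fact (i : Nat) :
    (PySem.List.pyRange 1 ((i:Int)+1) 1).foldl (fun f j => f * j) 1 = (Nat.factorial i : Int) := by
  induction i with
  | zero => rw [PySem.List.pyRange_one_eq_nil (by norm_num)]; simp [Nat.factorial]
  | succ i ih =>
      rw [show ((i+1 : Nat) : Int) + 1 = ((i:Int)+1) + 1 by omega]
      rw [PySem.List.pyRange_one_succ_right (by omega : (1:Int) ≤ (i:Int)+1)]
      rw [List.foldl_append, ih]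
      simp [Nat.factorial_succ]
      ring
theorem pv_digits (n a : Nat) (_hn : 2 ≤ n) :
    ∀ t, t ≤ n - 1 →
    ∃ ds : List Int,
      (PySem.List.pyRange 2 ((t:Int)+2) 1).foldl pvStepD ((a:Int), List.replicate (n-1) (0:Int))
        = (((a / Nat.factorial (t+1) : Nat) : Int), ds) ∧
      ds.length = n - 1 ∧
      ∀ p, p < n - 1 → ds.getD p 0 = if p < t then ((a / Nat.factorial (p+1) % (p+2) : Nat) : Int) else 0 := by
  intro t
  induction t with
  | zero =>
      intro _
      refine ⟨List.replicate (n-1) (0:Int), ?_, by simp, ?_⟩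
      · rw [show ((0:Nat):Int) + 2 = 2 by norm_num, PySem.List.pyRange_one_eq_nil (by norm_num)]
        simp [Nat.factorial]
      · intro p hp; simp
  | succ t ih =>
      intro ht
      obtain ⟨ds, hfold, hlen, hget⟩ := ih (by omega)
      refine ⟨ds.set t ((a / Nat.factorial (t+1) % (t+2) : Nat) : Int), ?_, by simp [hlen], ?_⟩
      · rw [show ((t+1 : Nat) : Int) + 2 = ((t:Int)+2) + 1 by push_cast; ring]
        rw [PySem.List.pyRange_one_succ_right (by omega : (2:Int) ≤ (t:Int)+2)]
        rw [List.foldl_append, hfold]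
        simp only [List.foldl_cons, List.foldl_nil, pvStepD]
        simp only [Prod.mk.injEq]
        constructor
        · rw [show ((t:Int)+2) = ((t+2 : Nat) : Int) by push_cast; ring]
          rw [PySem.Int.floordiv_natCast]
          rw [Nat.div_div_eq_div_mul]
          congr 2
          rw [Nat.factorial_succ (t+1)]; ring
        · rw [show ((t:Int)+2) - 2 = ((t : Nat) : Int) by ring]
          rw [show ((t:Int)+2) = ((t+2 : Nat) : Int) by push_cast; ring]
          rw [PySem.Int.mod_natCast, PySem.List.pySetD_natCast]
      · intro p hp
        rcases Nat.lt_trichotomy p t with h | h | h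
        · rw [List.getD, List.getElem?_set_ne (by omega)]
          have := hget p hp
          rw [List.getD] at this
          rw [this, if_pos h, if_pos (by omega)]
        · subst h
          rw [List.getD, List.getElem?_set_self (by omega : p < ds.length)]
          simp
        · rw [List.getD, List.getElem?_set_ne (by omega)]
          have := hget p hp
          rw [List.getD] at this
          rw [this, if_neg (by omega), if_neg (by omega)]

-- shifting the initial code by -n! changes only the running quotient of B's divmod chain
-- (by n!/(t+1)!), never the digits written
theorem pv_chain_shift (n : Nat) (x : Int) :
    ∀ t, t ≤ n - 1 → ∀ ds0 : List Int,
    (PySem.List.pyRange 2 ((t:Int)+2) 1).foldl pvStepD (x - (Nat.factorial n : Int), ds0)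
      = ((((PySem.List.pyRange 2 ((t:Int)+2) 1).foldl pvStepD (x, ds0)).1
            - ((Nat.factorial n / Nat.factorial (t+1) : Nat) : Int)),
         ((PySem.List.pyRange 2 ((t:Int)+2) 1).foldl pvStepD (x, ds0)).2) := by
  intro t
  induction t with
  | zero =>
      intro _ ds0
      rw [show ((0:Nat):Int) + 2 = 2 by norm_num, PySem.List.pyRange_one_eq_nil (by norm_num)]
      simp [Nat.factorial]
  | succ t ih =>
      intro ht ds0
      have h2n : t + 2 ≤ n := by omega
      have hdvd : Nat.factorial (t+2) ∣ Nat.factorial n := Nat.factorial_dvd_factorial h2n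
      obtain ⟨c, hc⟩ := hdvd
      have hK' : Nat.factorial n / Nat.factorial (t+2) = c := by
        rw [hc]; exact Nat.mul_div_cancel_left _ (Nat.factorial_pos _)
      have hK : Nat.factorial n / Nat.factorial (t+1) = (t+2) * c := by
        rw [hc, Nat.factorial_succ (t+1)]
        rw [show (t+2) * Nat.factorial (t+1) * c = (t+2) * c * Nat.factorial (t+1) by ring]
        exact Nat.mul_div_cancel _ (Nat.factorial_pos _)
      rw [show ((t+1 : Nat) : Int) + 2 = ((t:Int)+2) + 1 by push_cast; ring]
      rw [PySem.List.pyRange_one_succ_right (by omega : (2:Int) ≤ (t:Int)+2)]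
      rw [List.foldl_append, List.foldl_append]
      rw [ih (by omega) ds0]
      simp only [List.foldl_cons, List.foldl_nil, pvStepD]
      set q := ((PySem.List.pyRange 2 ((t:Int)+2) 1).foldl pvStepD (x, ds0)).1 with hq
      have hsub : q - ((Nat.factorial n / Nat.factorial (t+1) : Nat) : Int)
          = q + (-(c:Int)) * ((t:Int)+2) := by
        rw [hK]; push_cast; ring
      simp only [Prod.mk.injEq]
      refine ⟨?_, ?_⟩
      · rw [hsub]
        simp only [PySem.Int.floordiv]
        rw [Int.add_mul_fdiv_right _ _ (by omega : ((t:Int)+2) ≠ 0)]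
        rw [hK']
        ring
      · rw [hsub]
        simp only [PySem.Int.mod]
        rw [Int.add_mul_fmod_self_right]

-- A's first pop with a code in [-m!, 0): the negative floor-division plus Python's
-- negative-index pop land on the same element as the shifted nonnegative code
theorem pv_stepA_shift (n : Nat) (hn : 2 ≤ n) (lst res : List Int) (hlen : lst.length = n)
    (x : Int) (hx0 : 0 ≤ x) (hxlt : x < (Nat.factorial n : Int)) :
    pvStepA (lst, res, x - (Nat.factorial n : Int)) ((n:Int) - 1)
      = pvStepA (lst, res, x) ((n:Int) - 1) := by
  have hfact : (PySem.List.pyRange 1 ((n:Int) - 1 + 1) 1).foldl (fun f j => f * j) 1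
      = (Nat.factorial (n-1) : Int) := by
    rw [show (n:Int) - 1 + 1 = ((n-1 : Nat) : Int) + 1 by omega]
    exact pv_fact (n-1)
  simp only [pvStepA, hfact]
  set f := (Nat.factorial (n-1) : Int) with hf
  have hfpos : 0 < f := by
    simp only [hf]; exact_mod_cast Nat.factorial_pos (n-1)
  have hnf : (Nat.factorial n : Int) = (n:Int) * f := by
    simp only [hf]
    conv_lhs => rw [show n = (n-1)+1 by omega]
    rw [Nat.factorial_succ]
    push_cast
    rw [show ((n-1:Nat):Int) + 1 = (n:Int) by omega]
  set pos := PySem.Int.floordiv x f with hpos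
  have hpos0 : 0 ≤ pos := by
    rw [hpos, PySem.Int.le_floordiv_iff_mul_le hfpos]
    simpa using hx0
  have hposlt : pos < (n:Int) := by
    rw [hpos, PySem.Int.floordiv_lt_iff_lt_mul hfpos]
    rw [← hnf]; exact hxlt
  have hpos' : PySem.Int.floordiv (x - (Nat.factorial n : Int)) f = pos - (n:Int) := by
    rw [show x - (Nat.factorial n : Int) = x + (-(n:Int)) * f by rw [hnf]; ring]
    simp only [PySem.Int.floordiv] at hpos ⊢
    rw [Int.add_mul_fdiv_right _ _ (by omega : f ≠ 0), ← hpos]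
    ring
  have hmod' : PySem.Int.mod (x - (Nat.factorial n : Int)) f = PySem.Int.mod x f := by
    rw [show x - (Nat.factorial n : Int) = x + (-(n:Int)) * f by rw [hnf]; ring]
    simp only [PySem.Int.mod]
    rw [Int.add_mul_fmod_self_right]
  have hidx : PySem.List.pyIdx? lst.length (pos - (n:Int)) = PySem.List.pyIdx? lst.length pos := by
    rw [hlen]
    simp only [PySem.List.pyIdx?]
    rw [if_neg (by omega), if_pos (by omega), if_pos hpos0, if_pos (by exact_mod_cast hposlt)]
    congr 1
    omega
  have hsome : PySem.List.pyIdx? lst.length pos = some pos.toNat := by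
    rw [hlen]
    simp only [PySem.List.pyIdx?]
    rw [if_pos hpos0, if_pos (by exact_mod_cast hposlt)]
  have hlt : pos.toNat < lst.length := by rw [hlen]; omega
  simp [hpos', hmod', PySem.List.pop?, hidx, hsome, List.getElem?_eq_getElem hlt]

theorem pv_loop (n a : Nat) (digits : List Int)
    (hd : ∀ p, p < n - 1 → digits.getD p 0 = ((a / Nat.factorial (p+1) % (p+2) : Nat) : Int)) :
    ∀ (iN : Nat), iN + 1 ≤ n →
    ∀ (used : List Bool) (out res : List Int),
      used.length = n → out.length = n →
      (pvFree used).length = iN + 1 →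
      out.drop (iN + 1) = res.reverse →
      (((PySem.List.pyRange ((iN:Int)) 0 (-1)).foldl pvStepA
          ((pvFree used).map (fun v : Nat => (v : Int)), res, ((a % Nat.factorial (iN+1) : Nat) : Int))).2.1
        ++ [PySem.List.pyGetD ((PySem.List.pyRange ((iN:Int)) 0 (-1)).foldl pvStepA
          ((pvFree used).map (fun v : Nat => (v : Int)), res, ((a % Nat.factorial (iN+1) : Nat) : Int))).1 0 0]).reverse
      = PySem.List.pySetD ((PySem.List.pyRange ((iN:Int)) 0 (-1)).foldl (pvStepB digits) (used, out)).2 0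
          ((pvSkipUsed ((PySem.List.pyRange ((iN:Int)) 0 (-1)).foldl (pvStepB digits) (used, out)).1 0 : Nat) : Int) := by
  intro iN
  induction iN with
  | zero =>
      intro _ used out res hul hol hfl hdrop
      rw [PySem.List.pyRange_neg_one_eq_nil (by norm_num)]
      simp only [List.foldl_nil]
      obtain ⟨v, hv⟩ := List.length_eq_one_iff.mp hfl
      rw [hv]
      simp only [List.map_cons, List.map_nil]
      rw [PySem.List.pyGetD_zero_cons]
      have hskip : pvSkipUsed used 0 = v := by
        rw [pv_skip_nth used (by rw [hv]; simp), hv]; rfl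
      rw [hskip, PySem.List.pySetD_of_nonneg out _ (by norm_num)]
      have h0 : (0:Int).toNat = 0 := rfl
      rw [h0]
      have := pv_drop_set out 0 ((v:Nat) : Int) (by omega)
      rw [List.drop_zero] at this
      have hdrop1 : out.drop 1 = res.reverse := by simpa using hdrop
      rw [this, hdrop1]
      simp
  | succ iN ih =>
      intro hle used out res hul hol hfl hdrop
      rw [PySem.List.pyRange_neg_one_cons (by positivity)]
      rw [show ((iN+1 : Nat) : Int) - 1 = ((iN : Nat) : Int) by push_cast; ring]
      simp only [List.foldl_cons]
      -- abbreviations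
      set c := a % Nat.factorial (iN+1+1) with hc
      set k := a / Nat.factorial (iN+1) % (iN+1+1) with hk
      have hkc : c / Nat.factorial (iN+1) = k := by
        rw [hc, hk, Nat.factorial_succ (iN+1), mul_comm, Nat.mod_mul_right_div_self]
      have hklt : k < iN + 1 + 1 := Nat.mod_lt _ (by omega)
      have hk' : k < (pvFree used).length := by omega
      set v := (pvFree used)[k]'hk' with hv
      -- step A
      have hstepA : pvStepA ((pvFree used).map (fun v : Nat => (v : Int)), res, ((c : Nat) : Int)) ((iN+1 : Nat) : Int)
          = (((pvFree used).eraseIdx k).map (fun v : Nat => (v : Int)), res ++ [((v:Nat) : Int)],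
             ((a % Nat.factorial (iN+1) : Nat) : Int)) := by
        rw [pvStepA]
        rw [pv_fact (iN+1)]
        rw [PySem.Int.floordiv_natCast, PySem.Int.mod_natCast, hkc]
        rw [PySem.List.pop?_natCast ((pvFree used).map (fun v : Nat => (v : Int))) k (by simpa using hk')]
        simp only [List.getElem_map]
        rw [← List.eraseIdx_map]
        have : c % Nat.factorial (iN+1) = a % Nat.factorial (iN+1) := by
          rw [hc, Nat.mod_mod_of_dvd _ (Nat.factorial_dvd_factorial (by omega))]
        rw [this]
      -- step B
      have hstepB : pvStepB digits (used, out) ((iN+1 : Nat) : Int)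
          = (used.set v true, out.set (iN+1) ((v:Nat) : Int)) := by
        rw [pvStepB]
        rw [show ((iN+1 : Nat) : Int) - 1 = ((iN : Nat) : Int) by push_cast; ring]
        rw [PySem.List.pyGetD_natCast]
        rw [hd iN (by omega)]
        rw [pv_sel_nth used k hk']
        rw [PySem.List.pySetD_natCast]
      rw [hstepA, hstepB]
      have hfree' : pvFree (used.set v true) = (pvFree used).eraseIdx k := by
        rw [hv]; exact pv_erase_free used k hk'
      have hIH := ih (by omega) (used.set v true) (out.set (iN+1) ((v:Nat) : Int)) (res ++ [((v:Nat) : Int)])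
        (by simp [hul]) (by simp [hol])
        (by rw [hfree']; rw [List.length_eraseIdx_of_lt hk']; omega)
        (by
          rw [pv_drop_set out (iN+1) ((v:Nat) : Int) (by omega)]
          rw [hdrop]
          simp)
      rw [hfree'] at hIH
      exact hIH
theorem pv_range0 (n : Nat) :
    PySem.List.pyRange 0 ((n:Nat) : Int) 1 = (List.range n).map (fun v : Nat => (v : Int)) := by
  rw [PySem.List.pyRange_one]
  simp

theorem pv_skip_single : pvSkipUsed [false] 0 = 0 := by
  rw [pvSkipUsed]; simp

theorem pv_main_nonneg (n a : Nat) (hn2 : 2 ≤ n) (halt : a < Nat.factorial n) :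
    integer_to_vote ((a:Nat) : Int) ((n:Nat) : Int) = integer_to_vote_alt ((a:Nat) : Int) ((n:Nat) : Int) := by
  obtain ⟨ds, hfold, hlen, hget⟩ := pv_digits n a hn2 (n-1) (le_refl _)
  rw [show ((n-1 : Nat) : Int) + 2 = ((n:Nat) : Int) + 1 by omega] at hfold
  simp only [integer_to_vote, integer_to_vote_alt]
  rw [show (((n:Nat) : Int) - 1).toNat = n - 1 by omega, show ((n:Nat) : Int).toNat = n by omega]
  rw [hfold]
  dsimp only
  have hd : ∀ p, p < n-1 → ds.getD p 0 = ((a / Nat.factorial (p+1) % (p+2) : Nat) : Int) := by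
    intro p hp
    rw [hget p hp, if_pos (by omega)]
  have H := pv_loop n a ds hd (n-1) (by omega) (List.replicate n false)
    (List.replicate n (0:Int)) []
    (by simp) (by simp)
    (by rw [pv_free_replicate]; simp; omega)
    (by rw [show n-1+1 = n by omega]; simp)
  rw [show ((n:Nat) : Int) - 1 = ((n-1:Nat) : Int) by omega]
  rw [pv_range0, ← pv_free_replicate]
  rw [show ((a:Nat):Int) = ((a % Nat.factorial (n-1+1) : Nat) : Int) by
    rw [show n-1+1 = n by omega, Nat.mod_eq_of_lt halt]]
  exact H

theorem pv_main (code m : Int) (h1 : 1 ≤ m)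
    (h2 : m = 1 ∨ (-(Nat.factorial m.toNat : Int) ≤ code ∧ code < (Nat.factorial m.toNat : Int))) :
    integer_to_vote code m = integer_to_vote_alt code m := by
  by_cases hm1 : m = 1
  · subst hm1
    simp only [integer_to_vote, integer_to_vote_alt]
    norm_num
    rw [pv_skip_single]
    decide
  · have hm2 : 2 ≤ m := by omega
    rcases h2 with h | ⟨hlo, hhi⟩
    · exact absurd h hm1
    set n := m.toNat with hn
    have hn2 : 2 ≤ n := by omega
    have hmn : m = (n : Int) := by omega
    by_cases hc : 0 ≤ code
    · set a := code.toNat with ha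
      have hca : code = (a : Int) := by omega
      rw [hca, hmn]
      exact pv_main_nonneg n a hn2 (by omega)
    · set a := (code + (Nat.factorial n : Int)).toNat with ha
      have hfn0 : (0:Int) ≤ (Nat.factorial n : Int) := by positivity
      have hca : code = ((a:Nat) : Int) - (Nat.factorial n : Int) := by omega
      have ha0 : ((0:Nat) : Int) ≤ ((a:Nat) : Int) := by omega
      have halt : a < Nat.factorial n := by omega
      have hA : integer_to_vote code m = integer_to_vote ((a:Nat) : Int) m := by
        simp only [integer_to_vote]
        rw [hmn]
        rw [PySem.List.pyRange_neg_one_cons (by omega : (0:Int) < ((n:Nat) : Int) - 1)]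
        simp only [List.foldl_cons]
        rw [hca]
        rw [pv_stepA_shift n hn2 (PySem.List.pyRange 0 ((n:Nat) : Int) 1) []
          (by rw [pv_range0]; simp)
          ((a:Nat) : Int) (by exact_mod_cast ha0) (by exact_mod_cast halt)]
      have hB : integer_to_vote_alt code m = integer_to_vote_alt ((a:Nat) : Int) m := by
        simp only [integer_to_vote_alt]
        rw [hmn]
        rw [show ((n:Nat) : Int) + 1 = ((n-1 : Nat) : Int) + 2 by omega]
        rw [hca]
        rw [pv_chain_shift n ((a:Nat) : Int) (n-1) (le_refl _)]
      rw [hA, hB, hmn]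
      exact pv_main_nonneg n a hn2 halt

-- ===== VERDICT (by name: the statement is the Claim_ definition above) =====
theorem integer_to_vote_spec : Claim_equal_integer_to_vote := by
  intro code m _ hpre
  obtain ⟨h1, h2⟩ := hpre
  show integer_to_vote code m = integer_to_vote_alt code m
  exact pv_main code m h1 h2
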